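-- pv_equiv track=rewrite | github.com/SvetlanaBogdanova/AlgAndStructPython | lesson_3/task_5.py | find_max_negative
-- ===== SOURCE A (Python) =====
-- def find_max_negative(arr):
--     max_negative_ind = -1
--     max_negative = float('-inf')
--     for i, n in enumerate(arr):
--         if 0 > n > max_negative:
--             max_negative_ind = i
--             max_negative = n
--
--     return max_negative_ind
-- ===== SOURCE B (Python) =====
-- def find_max_negative(arr):
--     negs = [n for n in arr if n < 0]
--     if not negs:
--         return -1
--     return arr.index(max(negs))
-- ===== Notes on version B (the rewrite author's own statement) =====
-- stated objective: simpler
-- what changed: Replaces the single running-best scan (index+value accumulators updated in one enumerate loop) by a filter/max/locate decomposition: collect the negatives, take their maximum, and return its first index via list.index; max's first-maximal rule and .index's first-occurrence rule reproduce A's first-wins tie-breaking and the -1 default.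
import Mathlib
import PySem

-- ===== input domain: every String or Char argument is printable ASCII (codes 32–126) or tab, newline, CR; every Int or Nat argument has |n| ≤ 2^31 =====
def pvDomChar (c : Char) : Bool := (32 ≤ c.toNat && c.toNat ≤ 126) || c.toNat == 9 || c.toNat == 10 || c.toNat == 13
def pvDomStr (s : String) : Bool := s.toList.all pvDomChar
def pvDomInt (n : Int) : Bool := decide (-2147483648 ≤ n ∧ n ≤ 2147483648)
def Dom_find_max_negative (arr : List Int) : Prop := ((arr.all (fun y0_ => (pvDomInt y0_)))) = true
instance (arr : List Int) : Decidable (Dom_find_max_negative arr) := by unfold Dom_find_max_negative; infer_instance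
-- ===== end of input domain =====

-- B changes the decomposition (filter the negatives, take their max, locate its first index)
-- instead of A's single running-best scan; same O(n) cost, plainer structure.

-- ===== PORT A =====
-- Python's float('-inf') sentinel is modelled as `none` (no negative seen yet);
-- the chained comparison `0 > n > max_negative` is `n < 0` when the sentinel is still -inf.
def findMaxNegOk (m : Option Int) (n : Int) : Bool :=
  match m with
  | none => true            -- n > float('-inf') always holds for an int n
  | some mv => decide (mv < n)

def findMaxNegGo : List Int → Int → Int → Option Int → Int
  | [], _, ind, _ => ind
  | n :: rest, i, ind, m =>
      if decide (n < 0) && findMaxNegOk m n then findMaxNegGo rest (i + 1) i (some n)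
      else findMaxNegGo rest (i + 1) ind m

def find_max_negative (arr : List Int) : Int :=
  findMaxNegGo arr 0 (-1) none

-- ===== PORT B =====
def find_max_negative_alt (arr : List Int) : Int :=
  let negs := arr.filter (fun n => decide (n < 0))
  match PySem.List.max? negs (fun x => x) with
  | none => -1                      -- negs empty
  | some m =>
      match PySem.List.index? arr m with
      | some j => (j : Int)
      | none => -1                  -- unreachable totality guard: m ∈ arr

-- ===== PRECONDITION & SPEC =====
def Spec_find_max_negative (arr : List Int) (out : Int) : Prop := out = find_max_negative_alt arr
instance (arr : List Int) (out : Int) : Decidable (Spec_find_max_negative arr out) := by unfold Spec_find_max_negative; infer_instance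

-- ===== CLAIM (what is proved, stated in full; the proofs are below) =====
def Claim_equal_find_max_negative : Prop := ∀ (arr : List Int), Dom_find_max_negative arr → Spec_find_max_negative arr (find_max_negative arr)

-- ===== LEMMAS AND PROOFS =====

-- (value, first index) of the maximal negative element, by structural recursion.
def specMN : List Int → Option (Int × Nat)
  | [] => none
  | n :: ns =>
    match specMN ns with
    | none => if n < 0 then some (n, 0) else none
    | some (v, j) => if n < 0 ∧ v ≤ n then some (n, 0) else some (v, j + 1)

theorem specMN_neg : ∀ (ns : List Int) (v : Int) (j : Nat), specMN ns = some (v, j) → v < 0 := by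
  intro ns
  induction ns with
  | nil => intro v j h; simp [specMN] at h
  | cons n rest ih =>
    intro v j h
    simp only [specMN] at h
    rcases hr : specMN rest with _ | ⟨vr, jr⟩ <;> rw [hr] at h
    · by_cases hn : n < 0 <;> simp [hn] at h <;> omega
    · have hvr := ih vr jr hr
      by_cases hc : n < 0 ∧ vr ≤ n <;> simp [hc] at h <;> omega

theorem specMN_index : ∀ (ns : List Int) (v : Int) (j : Nat),
    specMN ns = some (v, j) → PySem.List.index? ns v = some j := by
  intro ns
  induction ns with
  | nil => intro v j h; simp [specMN] at h
  | cons n rest ih =>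
    intro v j h
    simp only [specMN] at h
    rcases hr : specMN rest with _ | ⟨vr, jr⟩ <;> rw [hr] at h
    · by_cases hn : n < 0
      · simp [hn] at h
        obtain ⟨rfl, rfl⟩ := h
        exact PySem.List.index?_cons_self n rest
      · simp [hn] at h
    · have hvr := specMN_neg rest vr jr hr
      by_cases hc : n < 0 ∧ vr ≤ n
      · simp [hc] at h
        obtain ⟨rfl, rfl⟩ := h
        exact PySem.List.index?_cons_self n rest
      · simp [hc] at h
        obtain ⟨rfl, rfl⟩ := h
        have hne : n ≠ vr := by
          intro e
          by_cases h0 : n < 0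
          · exact hc ⟨h0, by omega⟩
          · omega
        rw [PySem.List.index?_cons_of_ne rest hne, ih vr jr hr]
        rfl

theorem foldl_max_comm : ∀ (t : List Int) (a b : Int),
    t.foldl max (max a b) = max a (t.foldl max b) := by
  intro t
  induction t with
  | nil => intro a b; rfl
  | cons c t ih =>
    intro a b
    simp only [List.foldl]
    rw [max_assoc, ih]

theorem specMN_max : ∀ (ns : List Int),
    PySem.List.max? (ns.filter (fun n => decide (n < 0))) (fun x => x) = (specMN ns).map Prod.fst := by
  intro ns
  induction ns with
  | nil => simp [specMN, PySem.List.max?]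
  | cons n rest ih =>
    simp only [specMN, List.filter]
    by_cases hn : n < 0
    · simp only [hn, decide_true]
      rcases hr : specMN rest with _ | ⟨vr, jr⟩ <;> rw [hr] at ih
      · have : rest.filter (fun n => decide (n < 0)) = [] := by
          rcases hfil : rest.filter (fun n => decide (n < 0)) with _ | ⟨h, t⟩
          · rfl
          · rw [hfil, PySem.List.max?_id_cons] at ih; simp at ih
        rw [this, PySem.List.max?_id_cons]
        simp
      · rcases hfil : rest.filter (fun n => decide (n < 0)) with _ | ⟨h, t⟩
        · rw [hfil] at ih; simp [PySem.List.max?] at ih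
        · rw [hfil, PySem.List.max?_id_cons] at ih
          simp at ih
          rw [PySem.List.max?_id_cons]
          simp only [List.foldl]
          rw [foldl_max_comm, ih]
          by_cases hle : vr ≤ n
          · simp [hle]
          · simp [hle, max_eq_right (not_le.mp hle).le]
    · simp only [hn, decide_false, ih]
      rcases hr : specMN rest with _ | ⟨vr, jr⟩ <;> simp [hn]

theorem findMaxNegGo_spec : ∀ (ns : List Int) (i ind : Int) (m : Option Int),
    findMaxNegGo ns i ind m =
      match specMN ns with
      | none => ind
      | some (v, j) => if findMaxNegOk m v then i + (j : Int) else ind := by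
  intro ns
  induction ns with
  | nil => intro i ind m; simp [findMaxNegGo, specMN]
  | cons n rest ih =>
    intro i ind m
    simp only [findMaxNegGo, specMN]
    by_cases hc : (decide (n < 0) && findMaxNegOk m n) = true
    · rw [if_pos hc, ih]
      simp only [Bool.and_eq_true, decide_eq_true_eq] at hc
      obtain ⟨hn, hok⟩ := hc
      rcases hr : specMN rest with _ | ⟨vr, jr⟩
      · simp [hn, hok]
      · have hvr := specMN_neg rest vr jr hr
        by_cases hle : vr ≤ n
        · have h1 : findMaxNegOk (some n) vr = false := by simp [findMaxNegOk]; omega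
          simp [h1, hn, hle, hok]
        · have h1 : findMaxNegOk (some n) vr = true := by simp [findMaxNegOk]; omega
          have h2 : findMaxNegOk m vr = true := by
            cases m with
            | none => rfl
            | some mv => simp [findMaxNegOk] at hok ⊢; omega
          have hc2 : ¬ (n < 0 ∧ vr ≤ n) := fun ⟨_, h⟩ => hle h
          simp [hc2, h1, h2]
          ring
    · rw [if_neg hc, ih]
      rcases hr : specMN rest with _ | ⟨vr, jr⟩
      · by_cases hn : n < 0
        · have : findMaxNegOk m n = false := by
            cases hb : findMaxNegOk m n
            · rfl
            · exact absurd (by simp [hn, hb]) hc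
          simp [hn, this]
        · simp [hn]
      · have hvr := specMN_neg rest vr jr hr
        by_cases hn : n < 0
        · have hok : findMaxNegOk m n = false := by
            cases hb : findMaxNegOk m n
            · rfl
            · exact absurd (by simp [hn, hb]) hc
          obtain ⟨mv, rfl⟩ : ∃ mv, m = some mv := by
            cases m with
            | none => simp [findMaxNegOk] at hok
            | some mv => exact ⟨mv, rfl⟩
          simp only [findMaxNegOk, decide_eq_false_iff_not, not_lt] at hok
          by_cases hle : vr ≤ n
          · have h1 : findMaxNegOk (some mv) n = false := by simp [findMaxNegOk]; omega
            have h2 : findMaxNegOk (some mv) vr = false := by simp [findMaxNegOk]; omega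
            simp [hn, hle, h1, h2]
          · have hc2 : ¬ (n < 0 ∧ vr ≤ n) := fun ⟨_, h⟩ => hle h
            simp only [hc2, if_false]
            cases hb : findMaxNegOk (some mv) vr <;> simp [hb] <;> omega
        · have hc2 : ¬ (n < 0 ∧ vr ≤ n) := fun ⟨h0, _⟩ => hn h0
          simp only [hc2, if_false]
          cases hb : findMaxNegOk m vr <;> simp [hb] <;> omega

-- ===== VERDICT (by name: the statement is the Claim_ definition above) =====
theorem find_max_negative_spec : Claim_equal_find_max_negative := by
  intro arr _
  unfold Spec_find_max_negative find_max_negative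
  simp only [find_max_negative_alt]
  rw [findMaxNegGo_spec, specMN_max]
  rcases h : specMN arr with _ | ⟨v, j⟩
  · simp
  · simp only [Option.map_some]
    rw [specMN_index arr v j h]
    simp [findMaxNegOk]
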